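-- pv_equiv track=rewrite | github.com/LucaSforza/algoritmi2 | algo2/batteria5/stringhe_ternarie.py | stringhe_quaternarie
-- ===== SOURCE A (Python) =====
-- def stringhe_quaternarie(n: int) -> int:
--     """
--         Dato n > 0 restituire le stringhe nell'alfabeto {0,1,2,3}
--         t.c. non ci siano dispari adicacenti
--     """
--     T = [[1,1,1,1] for _ in range(n+1)]
--     for i in range(2,n+1):
--         for j in range(4):
--             if j % 2 == 0:
--                 T[i][j] = sum(T[i-1])
--             else:
--                 T[i][j] = T[i-1][0]+T[i-1][2]
--     return sum(T[n])
-- ===== SOURCE B (Python) =====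
-- def stringhe_quaternarie(n: int) -> int:
--     """
--         Dato n > 0 restituire le stringhe nell'alfabeto {0,1,2,3}
--         t.c. non ci siano dispari adicacenti
--     """
--     # Per riga i il DP di A mantiene [e,o,e,o] con e' = 2e+2o, o' = 2e.
--     # Calcoliamo (e,o) = M^(n-1) @ (1,1) con M = [[2,2],[2,0]] per quadrature ripetute.
--     if n <= 1:
--         return 4
--     def mul(A, B):
--         (a, b, c, d), (e, f, g, h) = A, B
--         return (a*e + b*g, a*f + b*h, c*e + d*g, c*f + d*h)
--     R = (1, 0, 0, 1)
--     P = (2, 2, 2, 0)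
--     k = n - 1
--     while k:
--         if k & 1:
--             R = mul(R, P)
--         P = mul(P, P)
--         k >>= 1
--     a, b, c, d = R
--     e = a + b
--     o = c + d
--     return 2*e + 2*o
-- ===== Notes on version B (the rewrite author's own statement) =====
-- stated objective: faster
-- what changed: Replaces the O(n) row-by-row DP table with fast exponentiation (repeated squaring) of the 2x2 transition matrix [[2,2],[2,0]] applied to (1,1), exploiting that each DP row has the form [e,o,e,o].
import Mathlib
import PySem

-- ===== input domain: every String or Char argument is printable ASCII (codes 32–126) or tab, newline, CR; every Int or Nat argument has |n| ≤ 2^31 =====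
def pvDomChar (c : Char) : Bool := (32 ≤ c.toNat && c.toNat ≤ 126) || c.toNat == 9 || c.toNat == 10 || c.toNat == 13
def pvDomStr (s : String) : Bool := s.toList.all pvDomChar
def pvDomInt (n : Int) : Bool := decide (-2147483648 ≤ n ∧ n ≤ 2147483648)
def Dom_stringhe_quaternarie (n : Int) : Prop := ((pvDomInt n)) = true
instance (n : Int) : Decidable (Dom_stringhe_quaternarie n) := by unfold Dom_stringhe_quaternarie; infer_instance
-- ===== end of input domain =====

-- B replaces A's O(n) row-by-row DP table with repeated squaring of the 2x2
-- transition matrix [[2,2],[2,0]] applied to (1,1): objective = faster (asymptotic, O(log n)).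

-- ===== PORT A =====
-- sum(xs)
def pySum (xs : List Int) : Int := xs.foldl (· + ·) 0

-- body of A's outer loop: 'for j in range(4): T[i][j] = ...'
def pyAStep (T : List (List Int)) (i : Int) : List (List Int) :=
  (PySem.List.pyRange 0 4 1).foldl (fun T j =>
    let v : Int :=
      if PySem.Int.mod j 2 = 0 then
        pySum (T.getD (i-1).toNat [])
      else
        (T.getD (i-1).toNat []).getD 0 0 + (T.getD (i-1).toNat []).getD 2 0
    T.set i.toNat ((T.getD i.toNat []).set j.toNat v)) T

def stringhe_quaternarie (n : Int) : Int :=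
  let T := (PySem.List.pyRange 0 (n+1) 1).map (fun _ => ([1,1,1,1] : List Int))
  let T := (PySem.List.pyRange 2 (n+1) 1).foldl pyAStep T
  pySum (T.getD n.toNat [])

-- ===== PORT B =====
-- 2x2 integer matrix as (a,b,c,d) = [[a,b],[c,d]]
def mmul : Int × Int × Int × Int → Int × Int × Int × Int → Int × Int × Int × Int
  | (a, b, c, d), (e, f, g, h) => (a*e + b*g, a*f + b*h, c*e + d*g, c*f + d*h)

-- B's 'while k:' loop of repeated squaring
def bloop (R P : Int × Int × Int × Int) (k : Nat) : Int × Int × Int × Int :=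
  if k = 0 then R
  else bloop (if k % 2 = 1 then mmul R P else R) (mmul P P) (k / 2)
termination_by k
decreasing_by omega

def stringhe_quaternarie_alt (n : Int) : Int :=
  if n ≤ 1 then 4
  else
    match bloop (1, 0, 0, 1) (2, 2, 2, 0) (n - 1).toNat with
    | (a, b, c, d) => 2*(a + b) + 2*(c + d)

-- ===== PRECONDITION & SPEC =====
-- For n < 0 the Python A raises IndexError (T is empty and sum(T[n]) fails).
def Pre_stringhe_quaternarie (n : Int) : Prop := 0 ≤ n
instance (n : Int) : Decidable (Pre_stringhe_quaternarie n) := by unfold Pre_stringhe_quaternarie; infer_instance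
def pvWitness_stringhe_quaternarie : Int := 3

def Spec_stringhe_quaternarie (n : Int) (out : Int) : Prop := out = stringhe_quaternarie_alt n
instance (n : Int) (out : Int) : Decidable (Spec_stringhe_quaternarie n out) := by unfold Spec_stringhe_quaternarie; infer_instance

-- ===== CLAIM (what is proved, stated in full; the proofs are below) =====
def Claim_equal_stringhe_quaternarie : Prop := ∀ (n : Int), Dom_stringhe_quaternarie n → Pre_stringhe_quaternarie n → Spec_stringhe_quaternarie n (stringhe_quaternarie n)


-- ===== LEMMAS AND PROOFS =====

-- the common mathematical content: (e,o) of row k+1 of the DP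
def gpair : Nat → Int × Int
  | 0 => (1, 1)
  | k+1 => (2*(gpair k).1 + 2*(gpair k).2, 2*(gpair k).1)

-- row k of A's table (k ≥ 1; rows 0 and 1 both equal [1,1,1,1])
def rowk (k : Nat) : List Int := [(gpair (k-1)).1, (gpair (k-1)).2, (gpair (k-1)).1, (gpair (k-1)).2]

-- ---- B side ----

theorem mmul_assoc (A B C : Int × Int × Int × Int) : mmul (mmul A B) C = mmul A (mmul B C) := by
  obtain ⟨a, b, c, d⟩ := A; obtain ⟨e, f, g, h⟩ := B; obtain ⟨p, q, r, s⟩ := C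
  simp only [mmul, Prod.mk.injEq]
  refine ⟨by ring, by ring, by ring, by ring⟩

theorem mmul_one (A : Int × Int × Int × Int) : mmul A (1, 0, 0, 1) = A := by
  obtain ⟨a, b, c, d⟩ := A; simp [mmul]

theorem one_mmul (A : Int × Int × Int × Int) : mmul (1, 0, 0, 1) A = A := by
  obtain ⟨a, b, c, d⟩ := A; simp [mmul]

def ipow (P : Int × Int × Int × Int) : Nat → Int × Int × Int × Int
  | 0 => (1, 0, 0, 1)
  | k+1 => mmul P (ipow P k)

theorem ipow_sq (P : Int × Int × Int × Int) (q : Nat) :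
    ipow (mmul P P) q = ipow P (2*q) := by
  induction q with
  | zero => rfl
  | succ q ih =>
      have h2 : 2*(q+1) = (2*q + 1) + 1 := by omega
      rw [h2]
      show mmul (mmul P P) (ipow (mmul P P) q) = ipow P (2*q+1+1)
      rw [ih, mmul_assoc]
      rfl

theorem bloop_eq (k : Nat) : ∀ R P, bloop R P k = mmul R (ipow P k) := by
  induction k using Nat.strong_induction_on with
  | _ k ih =>
    intro R P
    rw [bloop]
    by_cases h0 : k = 0
    · subst h0; simp [ipow, mmul_one]
    · rw [if_neg h0, ih (k/2) (by omega), ipow_sq]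
      by_cases h1 : k % 2 = 1
      · rw [if_pos h1]
        have hk : k = 2*(k/2) + 1 := by omega
        conv_rhs => rw [hk]
        show mmul (mmul R P) (ipow P (2*(k/2))) = mmul R (mmul P (ipow P (2*(k/2))))
        exact mmul_assoc ..
      · rw [if_neg h1]
        have hk : 2*(k/2) = k := by omega
        rw [hk]

-- M^k applied to the column (1,1) is gpair k
theorem ipow_gpair (k : Nat) :
    ((ipow (2,2,2,0) k).1 + (ipow (2,2,2,0) k).2.1,
     (ipow (2,2,2,0) k).2.2.1 + (ipow (2,2,2,0) k).2.2.2) = gpair k := by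
  induction k with
  | zero => rfl
  | succ k ih =>
      rw [show ipow (2,2,2,0) (k+1) = mmul (2,2,2,0) (ipow (2,2,2,0) k) from rfl,
        show gpair (k+1) = (2*(gpair k).1 + 2*(gpair k).2, 2*(gpair k).1) from rfl, ← ih]
      generalize ipow (2,2,2,0) k = p
      obtain ⟨a, b, c, d⟩ := p
      simp only [mmul, Prod.mk.injEq]
      refine ⟨by ring, by ring⟩

theorem alt_eq (n : Int) (h : 0 ≤ n) :
    stringhe_quaternarie_alt n = 2*(gpair (n-1).toNat).1 + 2*(gpair (n-1).toNat).2 := by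
  by_cases h1 : n ≤ 1
  · have : n = 0 ∨ n = 1 := by omega
    rcases this with rfl | rfl <;> decide
  · unfold stringhe_quaternarie_alt
    rw [if_neg h1, bloop_eq, one_mmul]
    have hgp := ipow_gpair (n-1).toNat
    rw [Prod.ext_iff] at hgp
    generalize hp : ipow (2,2,2,0) (n-1).toNat = p at hgp
    obtain ⟨a, b, c, d⟩ := p
    simp only at hgp
    rw [← hgp.1, ← hgp.2]

-- ---- A side ----

theorem getD_of_getElem? {α : Type} (l : List α) (i : Nat) (d x : α) (h : l[i]? = some x) :
    l.getD i d = x := by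
  simp [List.getD, h]

theorem pyRange04 : PySem.List.pyRange 0 4 1 = [0, 1, 2, 3] := by decide

theorem sum_rowk (k : Nat) : pySum (rowk k) = 2*(gpair (k-1)).1 + 2*(gpair (k-1)).2 := by
  simp [pySum, rowk, List.foldl]; ring

-- effect of one outer-loop iteration at index i = t+1, given rows t and t+1 of T
theorem pyAStep_eq (T : List (List Int)) (t : Nat) (ht : 1 ≤ t)
    (hprev : T[t]? = some (rowk t)) (hcur : T[t+1]? = some ([1,1,1,1] : List Int)) :
    pyAStep T ((t:Int)+1) = T.set (t+1) (rowk (t+1)) := by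
  obtain ⟨hlt, -⟩ := List.getElem?_eq_some_iff.mp hcur
  have hi : ((t:Int)+1).toNat = t + 1 := by omega
  have hi1 : ((t:Int)+1 - 1).toNat = t := by omega
  have hTprev : T.getD t [] = rowk t := getD_of_getElem? _ _ _ _ hprev
  have hTcur : T.getD (t+1) [] = [1,1,1,1] := getD_of_getElem? _ _ _ _ hcur
  have hSprev : ∀ r : List Int, (T.set (t+1) r).getD t [] = rowk t := fun r => by
    rw [List.getD, List.getElem?_set_ne (show t+1 ≠ t by omega), hprev]; rfl
  have hScur : ∀ r : List Int, (T.set (t+1) r).getD (t+1) [] = r := fun r => by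
    rw [List.getD, List.getElem?_set_self hlt]; rfl
  have hif0 : ∀ (X Y : Int), (if PySem.Int.mod 0 2 = 0 then X else Y) = X := fun X Y => if_pos (by decide)
  have hif1 : ∀ (X Y : Int), (if PySem.Int.mod 1 2 = 0 then X else Y) = Y := fun X Y => if_neg (by decide)
  have hif2 : ∀ (X Y : Int), (if PySem.Int.mod 2 2 = 0 then X else Y) = X := fun X Y => if_pos (by decide)
  have hif3 : ∀ (X Y : Int), (if PySem.Int.mod 3 2 = 0 then X else Y) = Y := fun X Y => if_neg (by decide)
  have s0 : ∀ v : Int, ([1,1,1,1] : List Int).set (Int.toNat 0) v = [v,1,1,1] := fun v => rfl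
  have s1 : ∀ (a v : Int), ([a,1,1,1] : List Int).set (Int.toNat 1) v = [a,v,1,1] := fun a v => rfl
  have s2 : ∀ (a b v : Int), ([a,b,1,1] : List Int).set (Int.toNat 2) v = [a,b,v,1] := fun a b v => rfl
  have s3 : ∀ (a b c v : Int), ([a,b,c,1] : List Int).set (Int.toNat 3) v = [a,b,c,v] := fun a b c v => rfl
  have g0 : ∀ k, (rowk k).getD 0 0 = (gpair (k-1)).1 := fun k => rfl
  have g2 : ∀ k, (rowk k).getD 2 0 = (gpair (k-1)).1 := fun k => rfl
  unfold pyAStep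
  rw [pyRange04]
  simp only [List.foldl_cons, List.foldl_nil, hi, hi1, hif0, hif1, hif2, hif3,
    hTprev, hTcur, hSprev, hScur, List.set_set, s0, s1, s2, s3, g0, g2, sum_rowk]
  congr 1
  obtain ⟨u, rfl⟩ : ∃ u, t = u + 1 := ⟨t - 1, by omega⟩
  simp only [rowk, Nat.add_sub_cancel, gpair, List.cons.injEq, and_true]
  refine ⟨trivial, by ring, trivial, by ring⟩

def T0 (n : Int) : List (List Int) :=
  (PySem.List.pyRange 0 (n+1) 1).map (fun _ => ([1,1,1,1] : List Int))

theorem T0_get (m : Nat) (k : Nat) (hk : k ≤ m) :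
    (T0 (m:Int))[k]? = some ([1,1,1,1] : List Int) := by
  unfold T0
  have : ((m:Int) + 1) = ((m+1 : Nat) : Int) := by push_cast; ring
  rw [this]
  exact PySem.List.getElem?_map_pyRange_zero _ _ _ (by omega)

-- invariant of A's outer loop
theorem foldA (m : Nat) (t : Nat) (ht1 : 1 ≤ t) (htm : t ≤ m) :
    ∀ k, k ≤ m →
      ((PySem.List.pyRange 2 ((t:Int)+1) 1).foldl pyAStep (T0 (m:Int)))[k]? =
        some (if k ≤ t then rowk k else ([1,1,1,1] : List Int)) := by
  induction t with
  | zero => omega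
  | succ t ih =>
    intro k hk
    by_cases ht : t = 0
    · subst ht
      rw [show (((0+1 : Nat)):Int) + 1 = 2 by norm_num,
        PySem.List.pyRange_one_eq_nil (by norm_num : (2:Int) ≤ 2), List.foldl_nil, T0_get m k hk]
      congr 1
      split_ifs with h
      · interval_cases k <;> rfl
      · rfl
    · have ht1' : 1 ≤ t := by omega
      have hcast : (((t+1 : Nat)):Int) + 1 = ((t:Int)+1)+1 := by push_cast; ring
      rw [hcast, PySem.List.pyRange_one_succ_right (show (2:Int) ≤ (t:Int)+1 by omega),
        List.foldl_append, List.foldl_cons, List.foldl_nil]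
      set Tt := (PySem.List.pyRange 2 ((t:Int)+1) 1).foldl pyAStep (T0 (m:Int)) with hTt
      have hprev : Tt[t]? = some (rowk t) := by
        rw [ih ht1' (by omega) t (by omega), if_pos (le_refl t)]
      have hcur : Tt[t+1]? = some ([1,1,1,1] : List Int) := by
        rw [ih ht1' (by omega) (t+1) (by omega), if_neg (by omega)]
      rw [pyAStep_eq Tt t ht1' hprev hcur]
      by_cases hk1 : k = t + 1
      · subst hk1
        obtain ⟨hlt, -⟩ := List.getElem?_eq_some_iff.mp hcur
        rw [List.getElem?_set_self hlt, if_pos (le_refl (t+1))]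
      · rw [List.getElem?_set_ne (by omega), ih ht1' (by omega) k hk]
        congr 1
        split_ifs with h1 h2
        · rfl
        · omega
        · omega
        · rfl

theorem a_eq (n : Int) (h : 0 ≤ n) :
    stringhe_quaternarie n = 2*(gpair (n-1).toNat).1 + 2*(gpair (n-1).toNat).2 := by
  obtain ⟨m, rfl⟩ := Int.eq_ofNat_of_zero_le h
  by_cases hm : m ≤ 1
  · have : m = 0 ∨ m = 1 := by omega
    rcases this with rfl | rfl <;> decide
  · have hfold := foldA m m (by omega) (le_refl m) m (le_refl m)
    rw [if_pos (le_refl m)] at hfold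
    unfold stringhe_quaternarie
    unfold T0 at hfold
    show pySum ((List.foldl pyAStep ((PySem.List.pyRange 0 ((m:Int)+1) 1).map (fun _ => ([1,1,1,1] : List Int))) (PySem.List.pyRange 2 ((m:Int)+1) 1)).getD ((m:Int)).toNat []) = 2 * (gpair ((m:Int) - 1).toNat).1 + 2 * (gpair ((m:Int) - 1).toNat).2
    rw [show ((m:Int)).toNat = m from rfl, getD_of_getElem? _ _ _ _ hfold, sum_rowk,
      show ((m:Int) - 1).toNat = m - 1 by omega]

-- ===== VERDICT (by name: the statement is the Claim_ definition above) =====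
theorem stringhe_quaternarie_spec : Claim_equal_stringhe_quaternarie := by
  intro n _ hpre
  unfold Spec_stringhe_quaternarie
  rw [a_eq n hpre, alt_eq n hpre]
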